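-- pv_equiv track=rewrite | github.com/Yuvansh1/pdf_summarizer | main.py | find_relevant_chunks
-- ===== SOURCE A (Python) =====
-- def find_relevant_chunks(chunks: list, query: str, top_n: int = 4) -> str:
--     """Return top_n most relevant chunks using simple keyword matching."""
--     query_words = set(query.lower().split())
--     scored = []
--     for chunk in chunks:
--         chunk_words = set(chunk.lower().split())
--         score = len(query_words & chunk_words)
--         scored.append((score, chunk))
--     scored.sort(key=lambda x: x[0], reverse=True)
--     selected = [chunk for _, chunk in scored[:top_n]]
--     return "\n---\n".join(selected)
-- ===== SOURCE B (Python) =====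
-- def find_relevant_chunks(chunks: list, query: str, top_n: int = 4) -> str:
--     """Return top_n most relevant chunks by counting-sort buckets on the overlap score."""
--     query_words = set(query.lower().split())
--     buckets = {}
--     max_score = 0
--     for chunk in chunks:
--         score = len(query_words & set(chunk.lower().split()))
--         buckets.setdefault(score, []).append(chunk)
--         if score > max_score:
--             max_score = score
--     ordered = []
--     for s in range(max_score, -1, -1):
--         ordered.extend(buckets.get(s, []))
--     return "\n---\n".join(ordered[:top_n])
-- ===== Notes on version B (the rewrite author's own statement) =====
-- stated objective: alternative
-- what changed: A's stable descending comparison sort of (score, chunk) pairs is replaced by a counting-sort: one pass groups chunks into score buckets (dict, original order kept) while tracking the max score, then the output is assembled back-to-front from score 0 up to the max and sliced to top_n.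
import Mathlib
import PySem

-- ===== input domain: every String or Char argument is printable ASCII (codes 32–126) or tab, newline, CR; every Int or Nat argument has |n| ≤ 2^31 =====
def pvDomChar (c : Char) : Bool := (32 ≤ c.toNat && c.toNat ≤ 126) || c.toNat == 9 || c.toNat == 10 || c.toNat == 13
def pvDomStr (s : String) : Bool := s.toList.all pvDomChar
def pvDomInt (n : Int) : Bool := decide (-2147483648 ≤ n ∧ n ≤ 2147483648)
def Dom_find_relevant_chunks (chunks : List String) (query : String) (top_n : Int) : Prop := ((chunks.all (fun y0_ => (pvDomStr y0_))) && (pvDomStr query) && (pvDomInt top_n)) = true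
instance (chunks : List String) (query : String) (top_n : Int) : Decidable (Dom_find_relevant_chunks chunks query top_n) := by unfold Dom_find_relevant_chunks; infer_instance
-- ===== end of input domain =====

-- B replaces A's stable descending sort of the scored chunks by counting-sort buckets
-- (a dict score → chunks in original order, assembled back-to-front from score 0 up to the max);
-- objective: alternative (same result, no comparison sort).

-- ===== PORT A =====
-- score = len(query_words & set(chunk.lower().split())) — shared by both Pythons verbatim
def pvScore (qw : PySem.Set String) (c : String) : Int :=
  PySem.Set.len (PySem.Set.inter qw (PySem.Set.ofList (PySem.Str.split₀ (PySem.Str.lower c))))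

def find_relevant_chunks (chunks : List String) (query : String) (top_n : Int) : String :=
  let query_words := PySem.Set.ofList (PySem.Str.split₀ (PySem.Str.lower query))
  let scored := chunks.foldl (fun acc chunk => acc ++ [(pvScore query_words chunk, chunk)]) []
  let sortedL := PySem.List.sorted scored (fun x => x.1) true
  let selected := (PySem.List.slice sortedL none (some top_n)).map (fun p => p.2)
  PySem.Str.join "\n---\n" selected

-- ===== PORT B =====
def find_relevant_chunks_alt (chunks : List String) (query : String) (top_n : Int) : String :=
  let query_words := PySem.Set.ofList (PySem.Str.split₀ (PySem.Str.lower query))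
  -- one pass: buckets[score] = buckets.get(score, []) + [chunk]; running max_score
  let st := chunks.foldl
    (fun st chunk =>
      (st.1.modify (pvScore query_words chunk) [] (fun l => l ++ [chunk]),
       if pvScore query_words chunk > st.2 then pvScore query_words chunk else st.2))
    ((PySem.Dict.empty : PySem.Dict Int (List String)), (0 : Int))
  -- for s in range(max_score, -1, -1): ordered.extend(buckets.get(s, []))
  let ordered := (PySem.List.pyRange st.2 (-1) (-1)).foldl (fun acc s => acc ++ st.1.getD s []) []
  PySem.Str.join "\n---\n" (PySem.List.slice ordered none (some top_n))

-- ===== PRECONDITION & SPEC =====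
def Spec_find_relevant_chunks (chunks : List String) (query : String) (top_n : Int) (out : String) : Prop := out = find_relevant_chunks_alt chunks query top_n
instance (chunks : List String) (query : String) (top_n : Int) (out : String) : Decidable (Spec_find_relevant_chunks chunks query top_n out) := by unfold Spec_find_relevant_chunks; infer_instance

-- ===== CLAIM (what is proved, stated in full; the proofs are below) =====
def Claim_equal_find_relevant_chunks : Prop := ∀ (chunks : List String) (query : String) (top_n : Int), Dom_find_relevant_chunks chunks query top_n → Spec_find_relevant_chunks chunks query top_n (find_relevant_chunks chunks query top_n)

-- ===== LEMMAS AND PROOFS =====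

-- insertBy passes over a prefix it does not insert before
theorem pv_insertBy_append {α : Type} (before : α → α → Bool) (x : α) (as bs : List α)
    (h : ∀ a ∈ as, before x a = false) :
    PySem.List.insertBy before x (as ++ bs) = as ++ PySem.List.insertBy before x bs := by
  induction as with
  | nil => simp
  | cons a t ih =>
    have ha := h a (by simp)
    simp [PySem.List.insertBy, ha, ih (fun a' ha' => h a' (by simp [ha']))]

-- insertBy puts x in front when it goes before everything
theorem pv_insertBy_front {α : Type} (before : α → α → Bool) (x : α) (bs : List α)
    (h : ∀ b ∈ bs, before x b = true) :
    PySem.List.insertBy before x bs = x :: bs := by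
  cases bs with
  | nil => rfl
  | cons b t => simp [PySem.List.insertBy, h b (by simp)]

-- inserting one more pair into the bucket concatenation lands at the end of its own bucket
theorem pv_ins_flat (vs : List Int) (hs : vs.Pairwise (· > ·)) (x : Int × String) (hx : x.1 ∈ vs)
    (ds : List (Int × String)) :
    PySem.List.insertBy (fun a b => decide (b.1 < a.1)) x
        (vs.flatMap (fun s => ds.filter (fun p => p.1 == s)))
      = vs.flatMap (fun s => (ds ++ [x]).filter (fun p => p.1 == s)) := by
  induction vs with
  | nil => exact absurd hx (by simp)
  | cons v vt ih =>
    rw [List.pairwise_cons] at hs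
    have hvlt : ∀ s ∈ vt, s < v := fun s hsv => hs.1 s hsv
    simp only [List.flatMap_cons]
    have hkey : ∀ s, ∀ a ∈ ds.filter (fun p => p.1 == s), a.1 = s := by
      intro s a ha
      exact beq_iff_eq.mp (List.mem_filter.mp ha).2
    by_cases hxv : x.1 = v
    · have hskip : ∀ a ∈ ds.filter (fun p => p.1 == v), decide (a.1 < x.1) = false := by
        intro a ha
        have := hkey v a ha
        simp [this, hxv]
      rw [pv_insertBy_append _ _ _ _ hskip]
      have hfront : ∀ b ∈ vt.flatMap (fun s => ds.filter (fun p => p.1 == s)),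
          decide (b.1 < x.1) = true := by
        intro b hb
        obtain ⟨s, hsv, hbs⟩ := List.mem_flatMap.mp hb
        have := hkey s b hbs
        simp [this, hxv]
        exact hvlt s hsv
      rw [pv_insertBy_front _ _ _ hfront]
      have hrest : vt.flatMap (fun s => (ds ++ [x]).filter (fun p => p.1 == s))
          = vt.flatMap (fun s => ds.filter (fun p => p.1 == s)) := by
        apply List.flatMap_congr
        intro s hsv
        have : (x.1 == s) = false := by
          have := hvlt s hsv
          simp [hxv]
          omega
        simp [List.filter_append, this]
      rw [hrest]
      have hbucket : (ds ++ [x]).filter (fun p => p.1 == v)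
          = ds.filter (fun p => p.1 == v) ++ [x] := by
        simp [List.filter_append, hxv]
      rw [hbucket]
      simp
    · have hxvt : x.1 ∈ vt := (List.mem_cons.mp hx).resolve_left hxv
      have hxltv : x.1 < v := hvlt _ hxvt
      have hskip : ∀ a ∈ ds.filter (fun p => p.1 == v), decide (a.1 < x.1) = false := by
        intro a ha
        have := hkey v a ha
        simp [this]
        omega
      rw [pv_insertBy_append _ _ _ _ hskip]
      have hbucket : (ds ++ [x]).filter (fun p => p.1 == v) = ds.filter (fun p => p.1 == v) := by
        have : (x.1 == v) = false := by simp [hxv]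
        simp [List.filter_append, this]
      rw [hbucket, ih hs.2 hxvt]

-- the stable descending sort IS the bucket concatenation, buckets visited from high to low
theorem pv_sorted_eq_flatMap (ps : List (Int × String)) (M : Int)
    (h : ∀ p ∈ ps, 0 ≤ p.1 ∧ p.1 ≤ M) :
    PySem.List.sorted ps (fun p => p.1) true
      = (PySem.List.pyRange 0 (M + 1) 1).reverse.flatMap (fun s => ps.filter (fun p => p.1 == s)) := by
  induction ps using List.reverseRecOn with
  | nil => simp [PySem.List.sorted_rev_eq_foldl_insertBy]
  | append_singleton ds x ih =>
    rw [PySem.List.sorted_rev_eq_foldl_insertBy, List.foldl_append, List.foldl_cons, List.foldl_nil,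
      ← PySem.List.sorted_rev_eq_foldl_insertBy,
      ih (fun p hp => h p (by simp [hp]))]
    exact pv_ins_flat _ (List.pairwise_reverse.mpr (PySem.List.pairwise_lt_pyRange_one 0 (M + 1)))
      x (by
        rw [List.mem_reverse, PySem.List.mem_pyRange_one]
        have := h x (by simp)
        omega) ds

theorem pv_slice_map {α β : Type} (xs : List α) (b : Int) (f : α → β) :
    (PySem.List.slice xs none (some b)).map f = PySem.List.slice (xs.map f) none (some b) := by
  simp [PySem.List.slice, PySem.List.clampIdx, List.map_take]

-- ===== VERDICT (by name: the statement is the Claim_ definition above) =====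
theorem find_relevant_chunks_spec : Claim_equal_find_relevant_chunks := by
  intro chunks query top_n _
  unfold Spec_find_relevant_chunks find_relevant_chunks find_relevant_chunks_alt
  simp only [PySem.List.foldl_append_singleton_eq_map, List.nil_append]
  set qw := PySem.Set.ofList (PySem.Str.split₀ (PySem.Str.lower query)) with hqw
  rw [PySem.List.foldl_prod_mk
    (fun (d : PySem.Dict Int (List String)) chunk => d.modify (pvScore qw chunk) [] (fun l => l ++ [chunk]))
    (fun (m : Int) chunk => if pvScore qw chunk > m then pvScore qw chunk else m)
    chunks PySem.Dict.empty 0]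
  dsimp only
  have hmax : chunks.foldl (fun m chunk => if pvScore qw chunk > m then pvScore qw chunk else m) 0
      = chunks.foldl (fun m chunk => max m (pvScore qw chunk)) 0 :=
    PySem.List.foldl_congr_mem _ _ _ _ (fun acc x _ => by omega)
  set M := chunks.foldl (fun m chunk => max m (pvScore qw chunk)) 0 with hM
  obtain ⟨hM0, hMub⟩ := PySem.List.le_foldl_max_int chunks (pvScore qw) 0
  have hsnn : ∀ c : String, 0 ≤ pvScore qw c := by
    intro c; simp [pvScore, PySem.Set.len]
  have hdict : ∀ s : Int,
      (chunks.foldl (fun d chunk => d.modify (pvScore qw chunk) [] (fun l => l ++ [chunk]))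
        PySem.Dict.empty).getD s []
      = ((chunks.map (fun c => (pvScore qw c, c))).filter (fun p => p.1 == s)).map (fun p => p.2) := by
    intro s
    have := PySem.Dict.getD_foldl_modify_append
      (chunks.map (fun c => (pvScore qw c, c))) (PySem.Dict.empty : PySem.Dict Int (List String)) s
    rw [List.foldl_map] at this
    simpa using this
  rw [hmax, PySem.List.foldl_append_eq_flatMap, List.nil_append, PySem.List.pyRange_neg_one_eq_reverse]
  norm_num
  simp only [hdict]
  rw [pv_sorted_eq_flatMap (chunks.map (fun c => (pvScore qw c, c))) M
    (by rintro p hp; obtain ⟨c, hc, rfl⟩ := List.mem_map.mp hp; exact ⟨hsnn c, hMub c hc⟩)]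
  rw [pv_slice_map, List.map_flatMap]
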